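-- pv_equiv track=rewrite | github.com/liyu10000/tct | train_c1/roi_extract/WSI_ROI.py | in_roi
-- ===== SOURCE A (Python) =====
-- def in_roi(x_y, w_h, center, radius):
--     """ calculate if window is in roi circle
--     :param x_y: (x,y) of top-left window
--     :param w_h: (w,h) of window
--     :param center: (x,y) of roi circle
--     :param radius: radius of roi circle
--     """
--     x, y = x_y
--     w, h = w_h
--     vertices = [(x,y), (x+w,y), (x+w,y+h), (x,y+h)]
--     for vertex in vertices:
--         distance_square = (vertex[0] - center[0])**2 + (vertex[1] - center[1])**2
--         if distance_square > radius**2: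
--             return False
--     return True
-- ===== SOURCE B (Python) =====
-- def in_roi(x_y, w_h, center, radius):
--     x, y = x_y
--     w, h = w_h
--     dx = max(abs(x - center[0]), abs(x + w - center[0]))
--     dy = max(abs(y - center[1]), abs(y + h - center[1]))
--     return dx * dx + dy * dy <= radius ** 2
-- ===== Notes on version B (the rewrite author's own statement) =====
-- stated objective: simpler
-- what changed: Replaces the four-corner list-and-early-exit loop by a closed-form worst-corner test: take the per-axis maximum absolute offset from the center and compare dx^2+dy^2 with radius^2 once.
import Mathlib
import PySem

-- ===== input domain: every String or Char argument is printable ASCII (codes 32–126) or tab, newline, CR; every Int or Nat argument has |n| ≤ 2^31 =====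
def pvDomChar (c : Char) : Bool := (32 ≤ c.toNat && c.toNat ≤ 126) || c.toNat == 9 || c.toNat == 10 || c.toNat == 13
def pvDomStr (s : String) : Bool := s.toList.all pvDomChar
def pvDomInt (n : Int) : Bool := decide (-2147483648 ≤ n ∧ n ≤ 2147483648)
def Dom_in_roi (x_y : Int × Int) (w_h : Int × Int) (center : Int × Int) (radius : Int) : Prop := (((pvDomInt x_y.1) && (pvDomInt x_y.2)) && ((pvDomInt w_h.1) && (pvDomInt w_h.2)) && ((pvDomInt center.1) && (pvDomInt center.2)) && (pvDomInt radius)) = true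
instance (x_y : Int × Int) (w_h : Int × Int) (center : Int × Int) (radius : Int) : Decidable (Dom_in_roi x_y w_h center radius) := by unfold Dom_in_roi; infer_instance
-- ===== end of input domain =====

-- B replaces A's four-corner loop with a closed-form worst-corner test (per-axis max absolute offset); objective: simpler.


-- ===== PORT A =====
-- the 'for vertex in vertices' loop with early 'return False'
def inRoiLoop (center : Int × Int) (radius : Int) : List (Int × Int) → Bool
  | [] => true
  | vertex :: rest =>
      let distance_square := (vertex.1 - center.1) ^ 2 + (vertex.2 - center.2) ^ 2
      if distance_square > radius ^ 2 then false else inRoiLoop center radius rest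

def in_roi (x_y : Int × Int) (w_h : Int × Int) (center : Int × Int) (radius : Int) : Bool :=
  let x := x_y.1; let y := x_y.2
  let w := w_h.1; let h := w_h.2
  let vertices : List (Int × Int) := [(x, y), (x + w, y), (x + w, y + h), (x, y + h)]
  inRoiLoop center radius vertices

-- ===== PORT B =====
def in_roi_alt (x_y : Int × Int) (w_h : Int × Int) (center : Int × Int) (radius : Int) : Bool :=
  let x := x_y.1; let y := x_y.2
  let w := w_h.1; let h := w_h.2
  let dx := max |x - center.1| |x + w - center.1|
  let dy := max |y - center.2| |y + h - center.2|
  decide (dx * dx + dy * dy ≤ radius ^ 2)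

-- ===== PRECONDITION & SPEC =====
def Spec_in_roi (x_y : Int × Int) (w_h : Int × Int) (center : Int × Int) (radius : Int) (out : Bool) : Prop := out = in_roi_alt x_y w_h center radius
instance (x_y : Int × Int) (w_h : Int × Int) (center : Int × Int) (radius : Int) (out : Bool) : Decidable (Spec_in_roi x_y w_h center radius out) := by unfold Spec_in_roi; infer_instance

-- ===== CLAIM (what is proved, stated in full; the proofs are below) =====
def Claim_equal_in_roi : Prop := ∀ (x_y : Int × Int) (w_h : Int × Int) (center : Int × Int) (radius : Int), Dom_in_roi x_y w_h center radius → Spec_in_roi x_y w_h center radius (in_roi x_y w_h center radius)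

-- ===== LEMMAS AND PROOFS =====
-- (max |a| |b|)² is the max of the squares
theorem max_abs_mul_self (a b : Int) : max |a| |b| * max |a| |b| = max (a ^ 2) (b ^ 2) := by
  rcases le_total |a| |b| with h | h
  · rw [max_eq_right h, abs_mul_abs_self,
      max_eq_right (by nlinarith [abs_nonneg a, abs_nonneg b, abs_mul_abs_self a, abs_mul_abs_self b])]
    ring
  · rw [max_eq_left h, abs_mul_abs_self,
      max_eq_left (by nlinarith [abs_nonneg a, abs_nonneg b, abs_mul_abs_self a, abs_mul_abs_self b])]
    ring

-- ===== VERDICT (by name: the statement is the Claim_ definition above) =====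
theorem in_roi_spec : Claim_equal_in_roi := by
  intro ⟨x, y⟩ ⟨w, h⟩ ⟨cx, cy⟩ r _
  show in_roi _ _ _ _ = in_roi_alt _ _ _ _
  simp only [in_roi, in_roi_alt, inRoiLoop, max_abs_mul_self]
  rcases max_cases ((x - cx) ^ 2) ((x + w - cx) ^ 2) with ⟨hx, hx'⟩ | ⟨hx, hx'⟩ <;>
    rcases max_cases ((y - cy) ^ 2) ((y + h - cy) ^ 2) with ⟨hy, hy'⟩ | ⟨hy, hy'⟩ <;>
    rw [hx, hy] <;> split_ifs <;>
    simp <;> omega
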